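-- pv_equiv track=rewrite | github.com/HOTSONHONET/Zebra-Fish-Tracker | services/src/utils/attributeExtractor.py | totalStationaryTime
-- ===== SOURCE A (Python) =====
-- from collections import Counter
--
-- class PARAMS:
--     PX_2_M = 0.0002645833
--     TOTAL_FRAMES = 0  # Will be set in main function
--     FPS = 25
--     THRES_FRAME_FREEZING = 20
--     WIDTH = 0
--     HEIGHT = 0
--
-- def totalStationaryTime(centriodsX, centriodsY):
--     finder = []
--     for centX, centY in list(zip(centriodsX, centriodsY)):
--         finder.append(f"{centX}_{centY}")
--     counter = Counter(finder)
--
--     freezedFrames = 0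
--     for _, cnt in counter.items():
--         if cnt > 10:
--             freezedFrames += cnt
--     freezingTime = freezedFrames // PARAMS.FPS
--     return round(freezingTime, 4)
-- ===== SOURCE B (Python) =====
-- class PARAMS:
--     FPS = 25
--
-- def totalStationaryTime(centriodsX, centriodsY):
--     # One streaming pass: bump each key's running count and account for the
--     # frozen frames incrementally the moment a key crosses the threshold.
--     counts = {}
--     freezedFrames = 0
--     for centX, centY in zip(centriodsX, centriodsY):
--         key = f"{centX}_{centY}"
--         c = counts.get(key, 0) + 1
--         counts[key] = c
--         if c == 11:
--             freezedFrames += 11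
--         elif c > 11:
--             freezedFrames += 1
--     return freezedFrames // PARAMS.FPS
-- ===== Notes on version B (the rewrite author's own statement) =====
-- stated objective: alternative
-- what changed: A builds the full key list, runs collections.Counter over it, then makes a second pass over counter.items() summing counts above 10; B is a single streaming pass that keeps a running count per key and credits the frozen-frame total incrementally (adds 11 the moment a key reaches its 11th occurrence, then 1 per further occurrence), with no Counter and no second pass.
import Mathlib
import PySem

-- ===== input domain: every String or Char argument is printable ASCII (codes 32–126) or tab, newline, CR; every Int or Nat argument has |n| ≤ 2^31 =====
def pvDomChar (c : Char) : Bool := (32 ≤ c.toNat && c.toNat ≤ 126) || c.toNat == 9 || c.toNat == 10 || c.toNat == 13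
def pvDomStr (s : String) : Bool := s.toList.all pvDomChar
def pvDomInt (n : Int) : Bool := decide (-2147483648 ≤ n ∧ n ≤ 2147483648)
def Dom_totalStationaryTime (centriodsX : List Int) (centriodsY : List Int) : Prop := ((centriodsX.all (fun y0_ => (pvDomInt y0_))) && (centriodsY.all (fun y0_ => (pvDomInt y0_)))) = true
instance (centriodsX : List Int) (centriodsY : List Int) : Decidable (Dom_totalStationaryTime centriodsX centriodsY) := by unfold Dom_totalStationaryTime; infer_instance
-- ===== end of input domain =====

-- B replaces A's Counter-then-sum two-phase count with a single streaming pass that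
-- credits frozen frames incrementally when a key crosses the threshold (alternative decomposition, same result).

-- ===== PORT A =====
def tstKey (p : Int × Int) : String := PySem.Int.toStr p.1 ++ "_" ++ PySem.Int.toStr p.2

def totalStationaryTime (centriodsX : List Int) (centriodsY : List Int) : Int :=
  let finder : List String :=
    (List.zip centriodsX centriodsY).foldl (fun acc p => acc ++ [tstKey p]) []
  let counter := PySem.Dict.counter finder
  let freezedFrames : Int :=
    counter.items.foldl (fun acc kv => if kv.2 > 10 then acc + kv.2 else acc) 0
  PySem.Int.floordiv freezedFrames 25

-- ===== PORT B =====
def tstStep (st : PySem.Dict String Int × Int) (key : String) : PySem.Dict String Int × Int :=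
  let c := st.1.getD key 0 + 1
  let counts := st.1.insert key c
  if c == 11 then (counts, st.2 + 11)
  else if c > 11 then (counts, st.2 + 1)
  else (counts, st.2)

def totalStationaryTime_alt (centriodsX : List Int) (centriodsY : List Int) : Int :=
  let st := (List.zip centriodsX centriodsY).foldl
    (fun st p => tstStep st (tstKey p)) (PySem.Dict.empty, 0)
  PySem.Int.floordiv st.2 25

-- ===== PRECONDITION & SPEC =====
def Spec_totalStationaryTime (centriodsX : List Int) (centriodsY : List Int) (out : Int) : Prop := out = totalStationaryTime_alt centriodsX centriodsY
instance (centriodsX : List Int) (centriodsY : List Int) (out : Int) : Decidable (Spec_totalStationaryTime centriodsX centriodsY out) := by unfold Spec_totalStationaryTime; infer_instance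

-- ===== CLAIM (what is proved, stated in full; the proofs are below) =====
def Claim_equal_totalStationaryTime : Prop := ∀ (centriodsX : List Int) (centriodsY : List Int), Dom_totalStationaryTime centriodsX centriodsY → Spec_totalStationaryTime centriodsX centriodsY (totalStationaryTime centriodsX centriodsY)

-- ===== LEMMAS AND PROOFS =====

-- the "frozen frames" total: for each distinct key, its count if it exceeds 10
def tstF (l : List String) : Int :=
  ((PySem.Set.ofList l).map (fun k => if l.count k > 10 then (l.count k : Int) else 0)).sum

-- sum of a map over a nodup list, changed at exactly one member
lemma tstSumUpdate {α : Type} [DecidableEq α] (s : List α) (x : α) (f g : α → Int)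
    (hs : s.Nodup) (hx : x ∈ s) (h : ∀ k ∈ s, k ≠ x → f k = g k) :
    (s.map f).sum = (s.map g).sum + (f x - g x) := by
  induction s with
  | nil => cases hx
  | cons a t ih =>
    rcases List.mem_cons.mp hx with rfl | hxt
    · have : ∀ k ∈ t, f k = g k := by
        intro k hk
        exact h k (List.mem_cons_of_mem _ hk) (fun he => (List.nodup_cons.mp hs).1 (he ▸ hk))
      simp [List.map_congr_left this]
      ring
    · have hfa : f a = g a := h a (List.mem_cons_self) (fun he => (List.nodup_cons.mp hs).1 (he ▸ hxt))
      have := ih (List.nodup_cons.mp hs).2 hxt (fun k hk => h k (List.mem_cons_of_mem _ hk))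
      simp [this, hfa]
      ring

lemma tstOfListAppend (l : List String) (x : String) :
    PySem.Set.ofList (l ++ [x]) = PySem.Set.add (PySem.Set.ofList l) x := by
  rw [PySem.Set.ofList_eq_foldl, PySem.Set.ofList_eq_foldl, List.foldl_append]
  rfl

lemma tstFAppend (l : List String) (x : String) :
    tstF (l ++ [x]) = tstF l +
      (if l.count x = 10 then 11 else if l.count x > 10 then 1 else 0) := by
  unfold tstF
  rw [tstOfListAppend]
  by_cases hx : x ∈ l
  · have hmem : x ∈ PySem.Set.ofList l := (PySem.Set.mem_ofList l x).mpr hx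
    have hadd : PySem.Set.add (PySem.Set.ofList l) x = PySem.Set.ofList l := by
      simp [PySem.Set.add, PySem.Set.contains, hmem]
    rw [hadd]
    rw [tstSumUpdate (PySem.Set.ofList l) x
      (fun k => if (l ++ [x]).count k > 10 then ((l ++ [x]).count k : Int) else 0)
      (fun k => if l.count k > 10 then (l.count k : Int) else 0)
      (PySem.Set.nodup_ofList l) hmem
      (fun k _ hk => by
        have hxk : ¬ x = k := fun he => hk he.symm
        simp [List.count_append, hxk])]
    have hc : (l ++ [x]).count x = l.count x + 1 := by simp [List.count_append]
    have hdelta : (if (l ++ [x]).count x > 10 then ((l ++ [x]).count x : Int) else 0)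
        - (if l.count x > 10 then (l.count x : Int) else 0)
        = (if l.count x = 10 then 11 else if l.count x > 10 then 1 else 0) := by
      rw [hc]
      split_ifs <;> push_cast at * <;> omega
    rw [hdelta]
  · have hmem : x ∉ PySem.Set.ofList l := fun h => hx ((PySem.Set.mem_ofList l x).mp h)
    have hadd : PySem.Set.add (PySem.Set.ofList l) x = PySem.Set.ofList l ++ [x] := by
      simp [PySem.Set.add, PySem.Set.contains, hmem]
    have hn : l.count x = 0 := List.count_eq_zero.mpr hx
    have hcx : (l ++ [x]).count x = 1 := by simp [List.count_append, hn]
    have hcongr : ∀ k ∈ PySem.Set.ofList l,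
        (if (l ++ [x]).count k > 10 then ((l ++ [x]).count k : Int) else 0)
          = (if l.count k > 10 then (l.count k : Int) else 0) := by
      intro k hk
      have hxk : ¬ x = k := fun he => hx (by rw [he]; exact (PySem.Set.mem_ofList l k).mp hk)
      simp [List.count_append, hxk]
    rw [hadd, List.map_append, List.sum_append, List.map_congr_left hcongr]
    simp [hn]

-- B's streaming fold computes exactly (running counter, tstF of the processed prefix)
lemma tstInv (l : List String) :
    l.foldl tstStep (PySem.Dict.empty, 0) =
      (l.foldl (fun d x => d.insert x (d.getD x 0 + 1)) PySem.Dict.empty, tstF l) := by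
  induction l using List.reverseRecOn with
  | nil => simp [tstF, PySem.Set.ofList]
  | append_singleton l x ih =>
    rw [List.foldl_append, List.foldl_append, ih]
    have hget : (l.foldl (fun d x => d.insert x (d.getD x 0 + 1)) PySem.Dict.empty).getD x 0
        = (l.count x : Int) := by
      rw [PySem.Dict.getD_foldl_insert_add_one]
      simp
    simp only [List.foldl_cons, List.foldl_nil, tstStep, hget, tstFAppend]
    rcases Nat.lt_trichotomy (l.count x) 10 with h10 | h10 | h10
    · have h1 : ¬ ((l.count x : Int) + 1 == 11) = true := by simp; omega
      have h2 : ¬ ((l.count x : Int) + 1 > 11) := by omega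
      simp [h1, h2, Nat.ne_of_lt h10, Nat.not_lt.mpr (Nat.le_of_lt h10)]
    · simp [h10]
    · have h1 : ¬ ((l.count x : Int) + 1 == 11) = true := by simp; omega
      have h2 : ((l.count x : Int) + 1 > 11) := by omega
      simp [h1, h2, h10, Nat.ne_of_gt h10]

-- A's counter-items pass also computes tstF of the key list
lemma tstAChar (keys : List String) :
    (PySem.Dict.counter keys).items.foldl
        (fun acc kv => if kv.2 > 10 then acc + kv.2 else acc) 0 = tstF keys := by
  have hstep : (fun (acc : Int) (kv : String × Int) => if kv.2 > 10 then acc + kv.2 else acc)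
      = fun acc kv => acc + (if kv.2 > 10 then kv.2 else 0) := by
    funext acc kv; split <;> simp
  rw [hstep, PySem.Dict.items_counter, PySem.List.foldl_add]
  unfold tstF
  simp only [List.map_map]
  rw [zero_add]
  congr 1
  apply List.map_congr_left
  intro k _
  simp only [Function.comp_apply]
  by_cases h : 10 < List.count k keys
  · have h' : (10:Int) < (List.count k keys : Int) := by exact_mod_cast h
    simp [h, h']
  · have h' : ¬ (10:Int) < (List.count k keys : Int) := by exact_mod_cast h
    simp [h, h']

-- ===== VERDICT (by name: the statement is the Claim_ definition above) =====
theorem totalStationaryTime_spec : Claim_equal_totalStationaryTime := by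
  intro cx cy _
  show totalStationaryTime cx cy = totalStationaryTime_alt cx cy
  simp only [totalStationaryTime, totalStationaryTime_alt]
  rw [PySem.List.foldl_append_singleton_eq_map, ← List.foldl_map, tstInv, List.nil_append,
    tstAChar]
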